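-- pv_equiv track=rewrite | github.com/bisht-xp/learning-python | 4_Hash_Tables/number_of_good_way_split_str.py | helper_func
-- ===== SOURCE A (Python) =====
-- def helper_func(s: str, start_left = False) -> list[int]:
--     n = len(s)
--     unique_set = set()
--     unique_list = [0]*n
--     unique_ele = 0
--
--     for i in range(n):
--         if start_left:
--             if s[i] not in unique_set:
--                 unique_set.add(s[i])
--                 unique_ele += 1
--
--             unique_list[i] = unique_ele
--         else:
--             if s[n-1-i] not in unique_set:
--                 unique_set.add(s[n-1-i])
--                 unique_ele += 1
--
--             unique_list[n-1-i] = unique_ele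
--
--     return unique_list
-- ===== SOURCE B (Python) =====
-- def helper_func(s: str, start_left = False) -> list[int]:
--     # Stateless brute force: the answer at i is just the number of distinct
--     # characters in the prefix s[:i+1] (left mode) or suffix s[i:] (right mode),
--     # recomputed from scratch with a fresh set for each position.
--     n = len(s)
--     if start_left:
--         return [len(set(s[:i + 1])) for i in range(n)]
--     return [len(set(s[i:])) for i in range(n)]
-- ===== Notes on version B (the rewrite author's own statement) =====
-- stated objective: simpler
-- what changed: Replaces A's single stateful scan (seen-set plus running distinct counter written through index arithmetic into a preallocated array) with a stateless per-position recount: each entry is len(set(prefix)) or len(set(suffix)) computed independently; B trades A's O(n) incremental state for an O(n^2) but far shorter direct definition.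
import Mathlib
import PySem

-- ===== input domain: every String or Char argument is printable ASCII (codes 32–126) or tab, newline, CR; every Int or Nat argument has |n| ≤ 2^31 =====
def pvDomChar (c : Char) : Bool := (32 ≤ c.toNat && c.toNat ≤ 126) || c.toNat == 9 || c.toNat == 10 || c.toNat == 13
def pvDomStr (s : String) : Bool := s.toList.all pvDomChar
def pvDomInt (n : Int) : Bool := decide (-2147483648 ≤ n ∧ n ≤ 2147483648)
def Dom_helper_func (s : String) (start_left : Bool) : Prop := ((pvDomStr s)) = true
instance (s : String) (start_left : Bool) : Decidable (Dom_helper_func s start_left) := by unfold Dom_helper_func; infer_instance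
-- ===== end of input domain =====

-- B replaces A's stateful seen-set scan with a stateless per-position recount (len(set(prefix/suffix))): shorter and plainer, at higher asymptotic cost; return values proved equal.

-- ===== PORT A =====
-- the 'for i in range(n)' loop of A, as a while-style recursion on remaining iterations (fuel = n - i)
def helperLoopA (cs : List Char) (n : Nat) (start_left : Bool) :
    Nat → Nat → (PySem.Set Char × List Int × Int) → (PySem.Set Char × List Int × Int)
  | _, 0, st => st
  | i, fuel+1, (us, ul, ue) =>
    if start_left then
      let c := cs.getD i 'A'          -- s[i]; i < n always, so getD is exact here
      if us.contains c then
        helperLoopA cs n start_left (i+1) fuel (us, ul.set i ue, ue)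
      else
        helperLoopA cs n start_left (i+1) fuel (us.add c, ul.set i (ue+1), ue+1)
    else
      let c := cs.getD (n-1-i) 'A'    -- s[n-1-i]; in range, so getD is exact here
      if us.contains c then
        helperLoopA cs n start_left (i+1) fuel (us, ul.set (n-1-i) ue, ue)
      else
        helperLoopA cs n start_left (i+1) fuel (us.add c, ul.set (n-1-i) (ue+1), ue+1)

def helper_func (s : String) (start_left : Bool) : List Int :=
  let cs := s.toList
  let n := cs.length
  (helperLoopA cs n start_left 0 n (PySem.Set.empty, List.replicate n (0:Int), 0)).2.1

-- ===== PORT B =====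
-- list comprehensions over range(n); s[:i+1] = take (i+1), s[i:] = drop i (exact: bounds are natural numbers)
def helper_func_alt (s : String) (start_left : Bool) : List Int :=
  let cs := s.toList
  let n := cs.length
  if start_left then
    (List.range n).map (fun i => ((PySem.Set.ofList (cs.take (i+1))).length : Int))
  else
    (List.range n).map (fun i => ((PySem.Set.ofList (cs.drop i)).length : Int))

-- ===== PRECONDITION & SPEC =====
def Spec_helper_func (s : String) (start_left : Bool) (out : List Int) : Prop := out = helper_func_alt s start_left
instance (s : String) (start_left : Bool) (out : List Int) : Decidable (Spec_helper_func s start_left out) := by unfold Spec_helper_func; infer_instance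

-- ===== CLAIM (what is proved, stated in full; the proofs are below) =====
def Claim_equal_helper_func : Prop := ∀ (s : String) (start_left : Bool), Dom_helper_func s start_left → Spec_helper_func s start_left (helper_func s start_left)

-- ===== LEMMAS AND PROOFS =====

-- reference function: running distinct-count over a char list
def gref (seen : PySem.Set Char) (cnt : Int) : List Char → List Int
  | [] => []
  | c :: rest =>
    (if seen.contains c then cnt else cnt + 1) ::
      gref (seen.add c) (if seen.contains c then cnt else cnt + 1) rest

lemma loopA_left (cs : List Char) : ∀ (fuel i : Nat) (seen : PySem.Set Char) (cnt : Int)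
    (out : List Int), i + fuel = cs.length → out.length = i →
    (helperLoopA cs cs.length true i fuel (seen, out ++ List.replicate fuel (0:Int), cnt)).2.1
      = out ++ gref seen cnt (cs.drop i) := by
  intro fuel
  induction fuel with
  | zero =>
    intro i seen cnt out hn _
    simp [helperLoopA, List.drop_of_length_le (by omega : cs.length ≤ i), gref]
  | succ fuel ih =>
    intro i seen cnt out hn hlen
    have hi : i < cs.length := by omega
    have hdrop : cs.drop i = cs[i] :: cs.drop (i+1) := List.drop_eq_getElem_cons hi
    have hget : cs.getD i 'A' = cs[i] := List.getD_eq_getElem cs 'A' hi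
    have hset : ∀ v : Int,
        (out ++ List.replicate (fuel+1) (0:Int)).set i v
          = (out ++ [v]) ++ List.replicate fuel (0:Int) := by
      intro v
      rw [List.set_append_right _ _ (by omega)]
      simp [hlen, List.replicate_succ]
    by_cases hc : cs[i] ∈ seen
    · have hcb : seen.contains cs[i] = true := (PySem.Set.contains_iff _ _).mpr hc
      simp only [helperLoopA, hget, hcb, if_true, hset cnt]
      rw [ih (i+1) seen cnt (out ++ [cnt]) (by omega) (by simp [hlen])]
      simp only [hdrop, gref, hcb, if_true, PySem.Set.add_of_mem hc]
      simp
    · have hcb : seen.contains cs[i] = false := by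
        simpa using (fun h => hc ((PySem.Set.contains_iff _ _).mp h))
      simp only [helperLoopA, hget, hcb, Bool.false_eq_true, if_true, if_false, hset (cnt+1)]
      rw [ih (i+1) (seen.add cs[i]) (cnt+1) (out ++ [cnt+1]) (by omega) (by simp [hlen])]
      simp only [hdrop, gref, hcb, Bool.false_eq_true, if_false]
      simp

lemma loopA_right (cs : List Char) : ∀ (fuel i : Nat) (seen : PySem.Set Char) (cnt : Int)
    (out : List Int), i + fuel = cs.length →
    (helperLoopA cs cs.length false i fuel (seen, List.replicate fuel (0:Int) ++ out, cnt)).2.1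
      = (gref seen cnt (cs.reverse.drop i)).reverse ++ out := by
  intro fuel
  induction fuel with
  | zero =>
    intro i seen cnt out hn
    simp [helperLoopA, List.drop_of_length_le (by simp; omega : cs.reverse.length ≤ i), gref]
  | succ fuel ih =>
    intro i seen cnt out hn
    have hi : i < cs.reverse.length := by simp; omega
    have hget : cs.reverse[i] = cs.getD (cs.length - 1 - i) 'A' := by
      rw [List.getElem_reverse]
      exact (List.getD_eq_getElem cs 'A' (by simp at hi; omega)).symm
    have hdrop : cs.reverse.drop i = cs.getD (cs.length - 1 - i) 'A' :: cs.reverse.drop (i+1) := by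
      rw [List.drop_eq_getElem_cons hi, hget]
    have hset : ∀ v : Int,
        (List.replicate (fuel+1) (0:Int) ++ out).set (cs.length - 1 - i) v
          = List.replicate fuel (0:Int) ++ (v :: out) := by
      intro v
      have hfi : cs.length - 1 - i = fuel := by omega
      rw [hfi, List.replicate_succ' (n := fuel)]
      rw [List.append_assoc, List.set_append_right _ _ (by simp)]
      simp
    by_cases hc : cs.getD (cs.length - 1 - i) 'A' ∈ seen
    · have hcb : seen.contains (cs.getD (cs.length - 1 - i) 'A') = true :=
        (PySem.Set.contains_iff _ _).mpr hc
      simp only [helperLoopA, Bool.false_eq_true, if_false, hcb, if_true, hset cnt]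
      rw [ih (i+1) seen cnt (cnt :: out) (by omega)]
      simp only [hdrop, gref, hcb, if_true, PySem.Set.add_of_mem hc]
      simp
    · have hcb : seen.contains (cs.getD (cs.length - 1 - i) 'A') = false := by
        simpa using (fun h => hc ((PySem.Set.contains_iff _ _).mp h))
      simp only [helperLoopA, Bool.false_eq_true, if_false, hcb, hset (cnt+1)]
      rw [ih (i+1) (seen.add (cs.getD (cs.length - 1 - i) 'A')) (cnt+1) ((cnt+1) :: out)
        (by omega)]
      simp only [hdrop, gref, hcb, Bool.false_eq_true, if_false]
      simp

-- number of NEW distinct elements l contributes beyond seen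
def dcount (seen : PySem.Set Char) (l : List Char) : Int :=
  ((PySem.Set.update seen l).length : Int) - seen.length

lemma dcount_single (seen : PySem.Set Char) (c : Char) :
    dcount seen [c] = if seen.contains c then 0 else 1 := by
  unfold dcount
  rw [PySem.Set.update_cons, PySem.Set.update_nil, PySem.Set.add_eq_ite]
  by_cases hc : c ∈ seen
  · simp [hc]
  · have : seen.contains c = false := by
      simpa using (fun h => hc ((PySem.Set.contains_iff _ _).mp h))
    simp [hc]

lemma dcount_cons (seen : PySem.Set Char) (c : Char) (l : List Char) :
    dcount seen (c :: l) = dcount seen [c] + dcount (seen.add c) l := by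
  unfold dcount
  rw [PySem.Set.update_cons, PySem.Set.update_cons, PySem.Set.update_nil]
  ring

lemma gref_eq_map (cs : List Char) : ∀ (seen : PySem.Set Char) (cnt : Int),
    gref seen cnt cs
      = (List.range cs.length).map (fun i => cnt + dcount seen (cs.take (i+1))) := by
  induction cs with
  | nil => intro seen cnt; simp [gref]
  | cons c rest ih =>
    intro seen cnt
    have e : (if seen.contains c then cnt else cnt + 1) = cnt + dcount seen [c] := by
      rw [dcount_single]
      by_cases h : seen.contains c = true
      · rw [if_pos h, if_pos h]; ring
      · rw [if_neg h, if_neg h]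
    rw [List.length_cons, List.range_succ_eq_map, List.map_cons, List.map_map]
    simp only [gref]
    rw [e]
    congr 1
    rw [ih (seen.add c) (cnt + dcount seen [c])]
    apply List.map_congr_left
    intro i _
    simp only [Function.comp_apply, Nat.succ_eq_add_one]
    rw [List.take_succ_cons]
    conv_rhs => rw [dcount_cons]
    ring

lemma dcount_empty (l : List Char) :
    dcount PySem.Set.empty l = ((PySem.Set.ofList l).length : Int) := by
  unfold dcount
  rw [show (PySem.Set.empty : PySem.Set Char) = ([] : List Char) from rfl,
      PySem.Set.update_nil_left]
  simp

lemma length_ofList_reverse (l : List Char) :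
    (PySem.Set.ofList l.reverse).length = (PySem.Set.ofList l).length := by
  apply List.Perm.length_eq
  rw [List.perm_ext_iff_of_nodup (PySem.Set.nodup_ofList _) (PySem.Set.nodup_ofList _)]
  intro a
  simp [PySem.Set.mem_ofList]

-- ===== VERDICT (by name: the statement is the Claim_ definition above) =====
theorem helper_func_spec : Claim_equal_helper_func := by
  intro s start_left _
  unfold Spec_helper_func helper_func helper_func_alt
  cases start_left
  · -- right-to-left case
    have hA := loopA_right s.toList s.toList.length 0 PySem.Set.empty 0 [] (by omega)
    simp only [List.drop_zero, List.append_nil] at hA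
    simp only [Bool.false_eq_true, if_false]
    rw [hA, gref_eq_map]
    apply List.ext_getElem (by simp)
    intro j h1 h2
    simp only [List.length_reverse, List.length_map, List.length_range] at h1 h2
    rw [List.getElem_reverse, List.getElem_map, List.getElem_map,
        List.getElem_range, List.getElem_range]
    simp only [List.length_map, List.length_range, List.length_reverse]
    have hlen : s.toList.length - 1 - j + 1 = s.toList.length - j := by omega
    rw [hlen, dcount_empty, List.take_reverse]
    have hidx : s.toList.length - (s.toList.length - j) = j := by omega
    rw [hidx, length_ofList_reverse]
    norm_num
  · -- left-to-right case
    have hA := loopA_left s.toList s.toList.length 0 PySem.Set.empty 0 [] (by omega) rfl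
    simp only [List.drop_zero, List.nil_append] at hA
    simp only [if_true]
    rw [hA, gref_eq_map]
    apply List.map_congr_left
    intro i _
    rw [dcount_empty]
    norm_num
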